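-- pv_equiv track=rewrite | github.com/robbiebatley/advent-of-code | 2023/day11/main.py | coord_map
-- ===== SOURCE A (Python) =====
-- from typing import List, Tuple, Dict, Set
--
-- def coord_map(values: List[int], expansion_rate: int) -> Dict[int, int]:
--     min_value = min(values)
--     max_value = max(values)
--     out = {}
--     n = 0
--     for i in range(min_value, max_value + 1):
--         if i not in values:
--             n += expansion_rate - 1
--         else:
--             out[i] = n
--     return out
-- ===== SOURCE B (Python) =====
-- def coord_map(values, expansion_rate):
--     s = sorted(set(values))
--     m = s[0]
--     return {v: (v - m - i) * (expansion_rate - 1) for i, v in enumerate(s)}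
-- ===== Notes on version B (the rewrite author's own statement) =====
-- stated objective: faster
-- what changed: Instead of walking every integer from min to max and scanning the list for membership at each step, B sorts the distinct values once and computes each offset in closed form from the value's rank: offset(v) = (v - min - rank)*(expansion_rate - 1).
import Mathlib
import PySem

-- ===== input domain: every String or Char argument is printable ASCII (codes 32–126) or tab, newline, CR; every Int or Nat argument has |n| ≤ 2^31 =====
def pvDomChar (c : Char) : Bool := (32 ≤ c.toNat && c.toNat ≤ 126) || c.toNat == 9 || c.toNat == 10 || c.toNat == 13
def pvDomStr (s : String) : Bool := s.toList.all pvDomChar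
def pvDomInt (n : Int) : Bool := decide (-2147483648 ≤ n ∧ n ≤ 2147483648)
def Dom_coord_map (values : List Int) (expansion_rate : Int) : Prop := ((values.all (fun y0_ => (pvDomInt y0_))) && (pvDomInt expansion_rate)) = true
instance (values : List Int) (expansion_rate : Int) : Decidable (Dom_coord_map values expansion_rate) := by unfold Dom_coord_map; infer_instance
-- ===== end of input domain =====

-- B replaces A's scan of the whole integer range [min, max] (with an 'i in values' list scan
-- at every i) by sorting the distinct values once and computing each offset in closed form
-- from the value's rank: offset(v) = (v - min - rank)*(rate - 1).  Objective: faster.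

-- ===== PORT A =====
-- out is a Python dict; under the convention it is the insertion-ordered association list.
def coord_map (values : List Int) (expansion_rate : Int) : List (Int × Int) :=
  match PySem.List.min? values (fun x => x), PySem.List.max? values (fun x => x) with
  | some min_value, some max_value =>
      (((PySem.List.pyRange min_value (max_value + 1) 1).foldl
        (fun (st : PySem.Dict Int Int × Int) i =>
          if ¬ (i ∈ values) then (st.1, st.2 + (expansion_rate - 1))
          else (st.1.insert i st.2, st.2))
        (PySem.Dict.empty, 0)).1).items
  | _, _ => []  -- Python raises ValueError here (empty list); excluded by Pre_

-- ===== PORT B =====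
def coord_map_alt (values : List Int) (expansion_rate : Int) : List (Int × Int) :=
  let s := PySem.List.sorted (PySem.Set.ofList values) (fun x => x) false
  match s with
  | [] => []  -- Python raises IndexError (s[0]) here; excluded by Pre_
  | m :: _ =>
      (PySem.List.enumerate s 0).map
        (fun p => (p.2, (p.2 - m - p.1) * (expansion_rate - 1)))

-- ===== PRECONDITION & SPEC =====
-- A raises ValueError (min of empty sequence) on the empty list; both ports are unclaimed there.
def Pre_coord_map (values : List Int) (expansion_rate : Int) : Prop := values ≠ []
instance (values : List Int) (expansion_rate : Int) : Decidable (Pre_coord_map values expansion_rate) := by unfold Pre_coord_map; infer_instance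
def pvWitness_coord_map : List Int × Int := ([4, 0, 4, 9], 10)

def Spec_coord_map (values : List Int) (expansion_rate : Int) (out : List (Int × Int)) : Prop := out = coord_map_alt values expansion_rate
instance (values : List Int) (expansion_rate : Int) (out : List (Int × Int)) : Decidable (Spec_coord_map values expansion_rate out) := by unfold Spec_coord_map; infer_instance

-- ===== CLAIM (what is proved, stated in full; the proofs are below) =====
def Claim_equal_coord_map : Prop := ∀ (values : List Int) (expansion_rate : Int), Dom_coord_map values expansion_rate → Pre_coord_map values expansion_rate → Spec_coord_map values expansion_rate (coord_map values expansion_rate)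

-- ===== LEMMAS AND PROOFS =====

-- Reference recursion: what A's loop appends for the range [a, b) with running offset n.
def pvR (values : List Int) (r a b n : Int) : List (Int × Int) :=
  if h : a < b then
    if a ∈ values then (a, n) :: pvR values r (a + 1) b n
    else pvR values r (a + 1) b (n + (r - 1))
  else []
termination_by (b - a).toNat
decreasing_by all_goals omega

lemma pvR_of_lt_mem {values : List Int} {r a b n : Int} (h : a < b) (hm : a ∈ values) :
    pvR values r a b n = (a, n) :: pvR values r (a + 1) b n := by
  rw [pvR]; simp [h, hm]

lemma pvR_of_lt_not_mem {values : List Int} {r a b n : Int} (h : a < b) (hm : a ∉ values) :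
    pvR values r a b n = pvR values r (a + 1) b (n + (r - 1)) := by
  rw [pvR]; simp [h, hm]

lemma pvR_of_le {values : List Int} {r a b n : Int} (h : b ≤ a) :
    pvR values r a b n = [] := by
  rw [pvR]; simp [not_lt.mpr h]

-- A's loop over [a, b) appends pvR to the dict built so far (whose keys are all < a).
lemma loopA (values : List Int) (r b : Int) :
    ∀ (k : Nat) (a : Int), (b - a).toNat = k → ∀ (d : PySem.Dict Int Int) (n : Int),
      (∀ p ∈ d.items, p.1 < a) →
      (((PySem.List.pyRange a b 1).foldl
        (fun (st : PySem.Dict Int Int × Int) i =>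
          if ¬ (i ∈ values) then (st.1, st.2 + (r - 1))
          else (st.1.insert i st.2, st.2)) (d, n)).1).items
        = d.items ++ pvR values r a b n := by
  intro k
  induction k with
  | zero =>
      intro a hk d n _
      have hba : b ≤ a := by omega
      rw [PySem.List.pyRange_one_eq_nil hba, pvR_of_le hba]
      simp
  | succ k ih =>
      intro a hk d n hd
      have hab : a < b := by omega
      rw [PySem.List.pyRange_one_cons hab]
      by_cases hm : a ∈ values
      · have hnc : d.contains a = false := by
          rw [Bool.eq_false_iff]
          intro hc
          rw [PySem.Dict.contains_iff_mem_keys] at hc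
          simp only [PySem.Dict.keys, List.mem_map] at hc
          obtain ⟨p, hp, hpa⟩ := hc
          have := hd p hp; omega
        rw [List.foldl_cons, if_neg (by simp [hm])]
        have e : (((d, n).1.insert a (d, n).2 : PySem.Dict Int Int), (d, n).2) = (d.insert a n, n) := rfl
        rw [e,
          ih (a + 1) (by omega) (d.insert a n) n (by
            intro p hp
            rcases (PySem.Dict.mem_items_insert _ _ _ _).1 hp with h1 | h2
            · simp [h1]
            · have := hd p h2.1; omega),
          PySem.Dict.items_insert_of_not_contains _ _ hnc,
          pvR_of_lt_mem hab hm]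
        simp
      · rw [List.foldl_cons, if_pos (by simp [hm])]
        have e : (((d, n).1 : PySem.Dict Int Int), (d, n).2 + (r - 1)) = (d, n + (r - 1)) := rfl
        rw [e, ih (a + 1) (by omega) d (n + (r - 1)) (by
            intro p hp; have := hd p hp; omega),
          pvR_of_lt_not_mem hab hm]

-- B's closed-form map over the enumerated filtered range equals pvR.
lemma loopB (values : List Int) (r b : Int) :
    ∀ (k : Nat) (a : Int), (b - a).toNat = k → ∀ (n s0 : Int),
      (PySem.List.enumerate ((PySem.List.pyRange a b 1).filter (fun x => decide (x ∈ values))) s0).map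
        (fun p => (p.2, n + (p.2 - a - (p.1 - s0)) * (r - 1)))
        = pvR values r a b n := by
  intro k
  induction k with
  | zero =>
      intro a hk n s0
      have hba : b ≤ a := by omega
      rw [PySem.List.pyRange_one_eq_nil hba, pvR_of_le hba]
      simp
  | succ k ih =>
      intro a hk n s0
      have hab : a < b := by omega
      rw [PySem.List.pyRange_one_cons hab]
      by_cases hm : a ∈ values
      · rw [List.filter_cons_of_pos (by simpa using hm), PySem.List.enumerate_cons,
          List.map_cons, pvR_of_lt_mem hab hm]
        congr 1
        · show ((a : Int), n + ((a : Int) - a - (s0 - s0)) * (r - 1)) = (a, n)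
          have hz : n + ((a : Int) - a - (s0 - s0)) * (r - 1) = n := by ring
          rw [hz]
        · rw [← ih (a + 1) (by omega) n (s0 + 1)]
          apply List.map_congr_left
          intro p _
          have : n + (p.2 - a - (p.1 - s0)) * (r - 1)
              = n + (p.2 - (a + 1) - (p.1 - (s0 + 1))) * (r - 1) := by ring
          rw [this]
      · rw [List.filter_cons_of_neg (by simpa using hm), pvR_of_lt_not_mem hab hm,
          ← ih (a + 1) (by omega) (n + (r - 1)) s0]
        apply List.map_congr_left
        intro p _
        have : n + (p.2 - a - (p.1 - s0)) * (r - 1)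
            = n + (r - 1) + (p.2 - (a + 1) - (p.1 - s0)) * (r - 1) := by ring
        rw [this]

-- sorted(set(values)) is the membership filter of the integer range [min, max].
lemma sorted_set_eq_filter (values : List Int) (m M : Int)
    (hmin : PySem.List.min? values (fun x => x) = some m)
    (hmax : PySem.List.max? values (fun x => x) = some M) :
    PySem.List.sorted (PySem.Set.ofList values) (fun x => x) false
      = (PySem.List.pyRange m (M + 1) 1).filter (fun x => decide (x ∈ values)) := by
  apply PySem.List.sorted_eq_of_perm_of_pairwise_lt
  · rw [List.perm_ext_iff_of_nodup
      (List.Nodup.filter _ (PySem.List.nodup_pyRange_one _ _)) (PySem.Set.nodup_ofList _)]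
    intro x
    simp only [List.mem_filter, PySem.List.mem_pyRange_one, PySem.Set.mem_ofList,
      decide_eq_true_eq]
    constructor
    · rintro ⟨_, hx⟩; exact hx
    · intro hx
      exact ⟨⟨PySem.List.min?_isMin hmin x hx, by have := PySem.List.max?_isMax hmax x hx; omega⟩, hx⟩
  · exact List.Pairwise.filter _ (PySem.List.pairwise_lt_pyRange_one _ _)

-- ===== VERDICT (by name: the statement is the Claim_ definition above) =====
theorem coord_map_spec : Claim_equal_coord_map := by
  intro values r _ hpre
  unfold Spec_coord_map
  obtain ⟨m, hmin⟩ : ∃ m, PySem.List.min? values (fun x => x) = some m := by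
    cases h : PySem.List.min? values (fun x => x) with
    | none => exact absurd ((PySem.List.min?_eq_none_iff _ _).1 h) hpre
    | some m => exact ⟨m, rfl⟩
  obtain ⟨M, hmax⟩ : ∃ M, PySem.List.max? values (fun x => x) = some M := by
    cases h : PySem.List.max? values (fun x => x) with
    | none => exact absurd ((PySem.List.max?_eq_none_iff _ _).1 h) hpre
    | some M => exact ⟨M, rfl⟩
  have hmem : m ∈ values := PySem.List.min?_mem hmin
  have hmM : m ≤ M := PySem.List.max?_isMax hmax m hmem
  have hfil := sorted_set_eq_filter values m M hmin hmax
  have hhead : (PySem.List.pyRange m (M + 1) 1).filter (fun x => decide (x ∈ values))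
      = m :: ((PySem.List.pyRange (m + 1) (M + 1) 1).filter (fun x => decide (x ∈ values))) := by
    rw [PySem.List.pyRange_one_cons (by omega), List.filter_cons_of_pos (by simpa using hmem)]
  -- A side
  simp only [coord_map, hmin, hmax]
  rw [loopA values r (M + 1) ((M + 1) - m).toNat m rfl PySem.Dict.empty 0 (by simp [PySem.Dict.empty])]
  -- B side
  rw [coord_map_alt]
  simp only [hfil, hhead]
  have hB := loopB values r (M + 1) ((M + 1) - m).toNat m rfl 0 0
  rw [hhead] at hB
  have hemp : (PySem.Dict.empty : PySem.Dict Int Int).items = [] := rfl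
  rw [hemp, List.nil_append, ← hB]
  apply List.map_congr_left
  intro p _
  have h1 : (p.2 - m - p.1) * (r - 1) = 0 + (p.2 - m - (p.1 - 0)) * (r - 1) := by ring
  rw [h1]
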